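-- pv_equiv track=rewrite | github.com/Radomir21/2024-Cryptanalysis | Lab_2/lab_2.py | crit_22_bigram
-- ===== SOURCE A (Python) =====
-- def crit_22_bigram(L, B_frq, k_x=50):
--     H0 = 0
--     H1 = 0
--
--     bigram_freq_template = {key: 0 for key in B_frq}
--
--     for sequence in L:
--         bigram_freq = bigram_freq_template.copy()
--
--         for j in range(len(sequence) - 1):
--             bigram = sequence[j:j + 2]
--             if bigram in bigram_freq:
--                 bigram_freq[bigram] += 1
--
--         if any(freq < k_x for freq in bigram_freq.values()):
--             H1 += 1
--         else:
--             H0 += 1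
--
--     return f'H1 = {H1}, H0 = {H0}'
-- ===== SOURCE B (Python) =====
-- def count_bigram(sequence, b):
--     return sum(1 for j in range(len(sequence) - 1) if sequence[j:j + 2] == b)
--
-- def crit_22_bigram(L, B_frq, k_x=50):
--     H0 = 0
--     for sequence in L:
--         if all(count_bigram(sequence, b) >= k_x for b in B_frq):
--             H0 += 1
--     H1 = len(L) - H0
--     return f'H1 = {H1}, H0 = {H0}'
-- ===== Notes on version B (the rewrite author's own statement) =====
-- stated objective: alternative
-- what changed: B inverts the loop nesting: instead of A's single pass per sequence that copies a per-template zero dict, increments it while scanning slices and then scans its values, B counts, for each template bigram separately, its matching length-2 slices of the sequence and short-circuits with all(); no dict is built and H1 is derived as len(L) - H0.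
import Mathlib
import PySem

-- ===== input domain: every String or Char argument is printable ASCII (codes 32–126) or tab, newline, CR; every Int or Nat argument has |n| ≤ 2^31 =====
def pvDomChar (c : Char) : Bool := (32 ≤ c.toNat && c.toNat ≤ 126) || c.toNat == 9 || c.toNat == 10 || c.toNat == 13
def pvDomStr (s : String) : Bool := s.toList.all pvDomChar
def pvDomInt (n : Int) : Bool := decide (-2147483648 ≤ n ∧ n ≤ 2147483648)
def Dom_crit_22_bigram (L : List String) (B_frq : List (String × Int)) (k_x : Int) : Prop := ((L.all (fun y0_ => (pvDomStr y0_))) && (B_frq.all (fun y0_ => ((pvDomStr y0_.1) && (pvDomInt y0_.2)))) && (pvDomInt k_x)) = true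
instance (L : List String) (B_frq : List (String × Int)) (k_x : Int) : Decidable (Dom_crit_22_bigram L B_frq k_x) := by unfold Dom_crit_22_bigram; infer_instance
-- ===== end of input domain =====

-- B inverts the loop nesting: per template bigram it counts matching length-2 slices of the
-- sequence with a short-circuiting all(), building no dict (objective: alternative).

-- ===== PORT A =====
def crit_22_bigram (L : List String) (B_frq : List (String × Int)) (k_x : Int) : String :=
  let bigram_freq_template : PySem.Dict String Int :=
    B_frq.foldl (fun d kv => d.insert kv.1 0) PySem.Dict.empty
  let hh : Int × Int := L.foldl (fun hh sequence =>
    let bigram_freq : PySem.Dict String Int :=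
      (PySem.List.pyRange 0 (PySem.Str.len sequence - 1) 1).foldl (fun d j =>
        let bigram := PySem.Str.slice sequence (some j) (some (j + 2))
        if d.contains bigram then d.insert bigram (d.getD bigram 0 + 1) else d)
        bigram_freq_template
    if bigram_freq.values.any (fun freq => decide (freq < k_x)) then (hh.1, hh.2 + 1)
    else (hh.1 + 1, hh.2)) (0, 0)
  "H1 = " ++ PySem.Int.toStr hh.2 ++ ", H0 = " ++ PySem.Int.toStr hh.1

-- ===== PORT B =====
-- count_bigram: sum(1 for j in range(len(sequence)-1) if sequence[j:j+2] == b)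
def pvCountBigram (sequence : String) (b : String) : Int :=
  (PySem.List.pyRange 0 (PySem.Str.len sequence - 1) 1).foldl
    (fun acc j => if PySem.Str.slice sequence (some j) (some (j + 2)) == b then acc + 1 else acc) 0

def crit_22_bigram_alt (L : List String) (B_frq : List (String × Int)) (k_x : Int) : String :=
  let H0 : Int := L.foldl (fun acc sequence =>
    if B_frq.all (fun kv => decide (k_x ≤ pvCountBigram sequence kv.1)) then acc + 1 else acc) 0
  let H1 : Int := (L.length : Int) - H0
  "H1 = " ++ PySem.Int.toStr H1 ++ ", H0 = " ++ PySem.Int.toStr H0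

-- ===== PRECONDITION & SPEC =====
def Spec_crit_22_bigram (L : List String) (B_frq : List (String × Int)) (k_x : Int) (out : String) : Prop := out = crit_22_bigram_alt L B_frq k_x
instance (L : List String) (B_frq : List (String × Int)) (k_x : Int) (out : String) : Decidable (Spec_crit_22_bigram L B_frq k_x out) := by unfold Spec_crit_22_bigram; infer_instance

-- ===== CLAIM (what is proved, stated in full; the proofs are below) =====
def Claim_equal_crit_22_bigram : Prop := ∀ (L : List String) (B_frq : List (String × Int)) (k_x : Int), Dom_crit_22_bigram L B_frq k_x → Spec_crit_22_bigram L B_frq k_x (crit_22_bigram L B_frq k_x)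

-- ===== LEMMAS AND PROOFS =====

def pvBigrams (l : List Char) : List String :=
  (l.zip l.tail).map (fun p => String.ofList [p.1, p.2])

lemma pvWindows (l : List Char) :
    (List.range (l.length - 1)).map (fun i => (l.drop i).take 2)
      = (l.zip l.tail).map (fun p => [p.1, p.2]) := by
  match l with
  | [] => simp
  | [a] => simp
  | a :: b :: t =>
    have ih := pvWindows (b :: t)
    simp only [List.length_cons, Nat.add_sub_cancel, List.range_succ_eq_map,
      List.map_cons, List.map_map, List.tail_cons, List.zip_cons_cons] at *
    rw [← ih]
    rfl

def pvStepA : PySem.Dict String Int → String → PySem.Dict String Int :=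
  fun d b => if d.contains b then d.insert b (d.getD b 0 + 1) else d

lemma pvStepA_contains (d : PySem.Dict String Int) (b k : String) (hk : d.contains k = true) :
    (pvStepA d b).contains k = true := by
  unfold pvStepA
  split
  · rw [PySem.Dict.contains_insert]; simp [hk]
  · exact hk

lemma pvFoldA_keys (bs : List String) (d : PySem.Dict String Int) :
    (bs.foldl pvStepA d).keys = d.keys := by
  induction bs generalizing d with
  | nil => rfl
  | cons b bs ih =>
    simp only [List.foldl_cons, ih]
    unfold pvStepA
    split
    · exact PySem.Dict.keys_insert_of_contains d _ (by assumption)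
    · rfl

lemma pvFoldA_getD (bs : List String) (d : PySem.Dict String Int) (k : String)
    (hk : d.contains k = true) :
    (bs.foldl pvStepA d).getD k 0 = d.getD k 0 + (bs.count k : Int) := by
  induction bs generalizing d with
  | nil => simp
  | cons b bs ih =>
    simp only [List.foldl_cons, List.count_cons]
    rw [ih _ (pvStepA_contains d b k hk)]
    by_cases hbk : b = k
    · subst hbk
      unfold pvStepA
      rw [if_pos hk, PySem.Dict.getD_insert_self]
      simp
      omega
    · have h1 : (pvStepA d b).getD k 0 = d.getD k 0 := by
        unfold pvStepA
        split
        · exact PySem.Dict.getD_insert_of_ne _ _ _ (fun h => hbk h.symm)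
        · rfl
      rw [h1]
      have : (b == k) = false := by simp [hbk]
      simp [this]

lemma pvSlices (s : String) :
    (PySem.List.pyRange 0 (PySem.Str.len s - 1) 1).map
        (fun j => PySem.Str.slice s (some j) (some (j + 2)))
      = pvBigrams s.toList := by
  set l := s.toList with hl
  match hn : l.length with
  | 0 =>
    have hnil : l = [] := List.length_eq_zero_iff.mp hn
    simp [PySem.Str.len, ← hl, pvBigrams, hnil]
  | Nat.succ m =>
    have hlen : PySem.Str.len s - 1 = (m : Int) := by
      simp [PySem.Str.len, ← hl, hn]
    rw [hlen, PySem.List.pyRange_zero_natCast, List.map_map]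
    have hpt : ∀ i : Nat, PySem.Str.slice s (some (i : Int)) (some ((i : Int) + 2))
        = String.ofList ((l.drop i).take 2) := by
      intro i
      show String.ofList (PySem.Chars.slice s.toList (some (i:Int)) (some ((i:Int)+2)))
        = String.ofList ((l.drop i).take 2)
      rw [PySem.Chars.slice_eq_listSlice, ← hl]
      have h2 : ((i:Int) + 2) = ((i:Int) + ((2:Nat):Int)) := by norm_num
      rw [h2, PySem.List.slice_natCast_add]
    calc (List.range m).map ((fun j => PySem.Str.slice s (some j) (some (j + 2))) ∘ (fun k : Nat => (k : Int)))
        = (List.range m).map (fun i : Nat => String.ofList ((l.drop i).take 2)) := by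
          exact List.map_congr_left (fun i _ => hpt i)
      _ = ((List.range (l.length - 1)).map (fun i => (l.drop i).take 2)).map String.ofList := by
          rw [List.map_map, hn]; rfl
      _ = pvBigrams l := by rw [pvWindows]; simp [pvBigrams]

lemma pvTemplate_getD (B_frq : List (String × Int)) (k : String) :
    (B_frq.foldl (fun d kv => d.insert kv.1 0)
      (PySem.Dict.empty : PySem.Dict String Int)).getD k 0 = 0 := by
  have : ∀ (d : PySem.Dict String Int), d.getD k 0 = 0 →
      (B_frq.foldl (fun d kv => d.insert kv.1 0) d).getD k 0 = 0 := by
    induction B_frq with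
    | nil => intro d h; exact h
    | cons kv tl ih =>
      intro d h
      apply ih
      rw [PySem.Dict.getD_insert]
      split
      · rfl
      · exact h
  exact this _ (PySem.Dict.getD_empty _ _)

lemma pvTemplate_keys (B_frq : List (String × Int)) :
    (B_frq.foldl (fun d kv => d.insert kv.1 0) (PySem.Dict.empty : PySem.Dict String Int)).keys
      = PySem.Set.ofList (B_frq.map (·.1)) := by
  rw [PySem.Dict.keys_foldl_insert_key B_frq (·.1) (fun _ _ => 0) PySem.Dict.empty]
  rw [PySem.Dict.keys_empty, PySem.Set.ofList_eq_foldl]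
  rfl

lemma pvPerSeq (B_frq : List (String × Int)) (k_x : Int) (s : String) :
    ((PySem.List.pyRange 0 (PySem.Str.len s - 1) 1).foldl (fun d j =>
        let bigram := PySem.Str.slice s (some j) (some (j + 2))
        if d.contains bigram then d.insert bigram (d.getD bigram 0 + 1) else d)
        (B_frq.foldl (fun d kv => d.insert kv.1 0)
          (PySem.Dict.empty : PySem.Dict String Int))).values.any
          (fun freq => decide (freq < k_x))
      = ! (B_frq.map (·.1)).all (fun key =>
          decide (k_x ≤ ((pvBigrams s.toList).count key : Int))) := by
  set T := B_frq.foldl (fun d kv => d.insert kv.1 0)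
      (PySem.Dict.empty : PySem.Dict String Int) with hT
  have hstep : (fun (d : PySem.Dict String Int) (j : Int) =>
      let bigram := PySem.Str.slice s (some j) (some (j + 2))
      if d.contains bigram then d.insert bigram (d.getD bigram 0 + 1) else d)
      = fun d j => pvStepA d (PySem.Str.slice s (some j) (some (j + 2))) := rfl
  rw [hstep, ← List.foldl_map, pvSlices]
  set F := (pvBigrams s.toList).foldl pvStepA T with hF
  have hTnodup : T.keys.Nodup := by
    rw [hT]
    exact PySem.Dict.nodup_keys_foldl_insert_key B_frq (·.1) (fun _ _ => 0) _
      PySem.Dict.nodup_keys_empty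
  have hkeys : F.keys = T.keys := pvFoldA_keys _ _
  have hFnodup : F.keys.Nodup := hkeys ▸ hTnodup
  rw [PySem.Dict.values_eq_map_keys F hFnodup 0, List.any_map, hkeys, pvTemplate_keys]
  have hcong : ∀ k ∈ PySem.Set.ofList (B_frq.map (·.1)),
      ((fun freq => decide (freq < k_x)) ∘ fun k => F.getD k 0) k
        = (fun k => decide (((pvBigrams s.toList).count k : Int) < k_x)) k := by
    intro k hk
    have hc : T.contains k = true := by
      rw [PySem.Dict.contains_iff_mem_keys, hT, pvTemplate_keys]
      exact hk
    have h0 : T.getD k 0 = 0 := by rw [hT]; exact pvTemplate_getD _ _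
    have hgd := pvFoldA_getD (pvBigrams s.toList) T k hc
    simp only [Function.comp_apply]
    rw [← hF] at hgd
    rw [hgd, h0, zero_add]
  rw [PySem.List.any_congr_mem hcong]
  rw [Bool.eq_iff_iff]
  simp only [List.any_eq_true, List.all_eq_false, Bool.not_eq_true', decide_eq_true_eq,
    not_le, PySem.Set.mem_ofList]

lemma pvCountFold (l : List String) (b : String) (acc : Int) :
    l.foldl (fun a x => if x == b then a + 1 else a) acc = acc + (l.count b : Int) := by
  induction l generalizing acc with
  | nil => simp
  | cons x tl ih =>
    simp only [List.foldl_cons, List.count_cons, ih]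
    by_cases h : x = b
    · simp [h]; ring
    · have : (x == b) = false := by simp [h]
      simp [this]

lemma pvCountBigram_eq (s b : String) :
    pvCountBigram s b = ((pvBigrams s.toList).count b : Int) := by
  unfold pvCountBigram
  calc (PySem.List.pyRange 0 (PySem.Str.len s - 1) 1).foldl
        (fun acc j => if PySem.Str.slice s (some j) (some (j + 2)) == b then acc + 1 else acc) 0
      = ((PySem.List.pyRange 0 (PySem.Str.len s - 1) 1).map
          (fun j => PySem.Str.slice s (some j) (some (j + 2)))).foldl
          (fun a x => if x == b then a + 1 else a) (0 : Int) := by rw [List.foldl_map]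
    _ = (pvBigrams s.toList).foldl (fun a x => if x == b then a + 1 else a) (0 : Int) := by
        rw [pvSlices]
    _ = 0 + ((pvBigrams s.toList).count b : Int) := pvCountFold _ _ _
    _ = ((pvBigrams s.toList).count b : Int) := by rw [zero_add]

lemma pvOuter (p : String → Bool) (L : List String) (a b : Int) :
    L.foldl (fun hh s => if p s then (hh.1, hh.2 + 1) else (hh.1 + 1, hh.2)) (a, b)
      = (a + (L.countP (fun s => !p s) : Int), b + (L.countP p : Int)) := by
  induction L generalizing a b with
  | nil => simp
  | cons s tl ih =>
    simp only [List.foldl_cons, List.countP_cons]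
    cases h : p s
    · rw [if_neg (by simp), ih]
      simp [Prod.ext_iff]
      ring
    · rw [if_pos rfl, ih]
      simp [Prod.ext_iff]
      ring

lemma crit_22_bigram_eq (L : List String) (B_frq : List (String × Int)) (k_x : Int) :
    crit_22_bigram L B_frq k_x = crit_22_bigram_alt L B_frq k_x := by
  unfold crit_22_bigram crit_22_bigram_alt
  simp only []
  set okB : String → Bool := fun sequence =>
    B_frq.all (fun kv => decide (k_x ≤ pvCountBigram sequence kv.1)) with hokB
  have hok : ∀ s, okB s = (B_frq.map (·.1)).all (fun key =>
      decide (k_x ≤ ((pvBigrams s.toList).count key : Int))) := by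
    intro s
    rw [hokB]
    simp only [List.all_map]
    congr 1
    funext kv
    simp only [Function.comp_apply]
    rw [pvCountBigram_eq]
  have hfun : (fun (hh : Int × Int) sequence =>
      if ((PySem.List.pyRange 0 (PySem.Str.len sequence - 1) 1).foldl (fun d j =>
          let bigram := PySem.Str.slice sequence (some j) (some (j + 2))
          if d.contains bigram then d.insert bigram (d.getD bigram 0 + 1) else d)
          (B_frq.foldl (fun d kv => d.insert kv.1 0)
            (PySem.Dict.empty : PySem.Dict String Int))).values.any
            (fun freq => decide (freq < k_x))
      then (hh.1, hh.2 + 1) else (hh.1 + 1, hh.2))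
      = fun hh s => if !okB s then (hh.1, hh.2 + 1) else (hh.1 + 1, hh.2) := by
    funext hh s
    rw [pvPerSeq B_frq k_x s, ← hok]
  rw [hfun, pvOuter]
  rw [PySem.List.foldl_if_add_one okB L 0]
  have hnn : (L.countP fun s => !!okB s) = L.countP okB := by
    apply List.countP_congr
    intro s _
    simp
  have hlen : (L.countP fun s => !okB s) = L.length - L.countP okB := by
    have h1 := List.length_eq_countP_add_countP okB (l := L)
    have h2 : L.countP (fun a => decide (¬ okB a = true)) = L.countP (fun s => !okB s) := by
      apply List.countP_congr
      intro s _
      simp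
    omega
  rw [hnn, hlen]
  have hcle : L.countP okB ≤ L.length := List.countP_le_length
  have e1 : ((L.length - L.countP okB : Nat) : Int) = (L.length : Int) - (0 + (L.countP okB : Int)) := by
    push_cast [hcle]
    ring
  rw [e1]
  simp only [zero_add]

-- ===== VERDICT (by name: the statement is the Claim_ definition above) =====
theorem crit_22_bigram_spec : Claim_equal_crit_22_bigram := by
  intro L B_frq k_x _
  unfold Spec_crit_22_bigram
  exact crit_22_bigram_eq L B_frq k_x
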